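-- pv_equiv track=rewrite | github.com/Pineci/ProjectEuler | Problem49.py | choose_list_internal
-- ===== SOURCE A (Python) =====
-- def choose_list_internal(l, n):
--     if n == 1:
--         return list(map(lambda x: tuple([x]), l))
--     elif n == len(l):
--         return [tuple(l)]
--     elif n < len(l):
--         result_unsorted = []
--         result = []
--         for i in range(len(l)):
--             element = l[i]
--             remaining_combos = choose_list_internal(l[0:i] + l[i+1:], n-1)
--             for combo in remaining_combos:
--                 result_unsorted.append(tuple([element]) + combo)
--         for alon in result_unsorted:
--             result.append(tuple(sorted(alon)))
--         return set(result)
-- ===== SOURCE B (Python) =====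
-- def choose_list_internal(l, n):
--     if n == 1:
--         return list(map(lambda x: tuple([x]), l))
--     elif n == len(l):
--         return [tuple(l)]
--     elif n < len(l):
--         # enumerate C(len,n) combinations directly by a choose/skip recursion
--         # (strictly increasing positions) instead of A's P(len,n) permutations
--         def combs(rest, k):
--             if k == 0:
--                 return [()]
--             if not rest:
--                 return []
--             first = rest[0]
--             tail = rest[1:]
--             return [(first,) + c for c in combs(tail, k - 1)] + combs(tail, k)
--         return {tuple(sorted(c)) for c in combs(l, n)}
-- ===== Notes on version B (the rewrite author's own statement) =====
-- stated objective: alternative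
-- what changed: Instead of recursively generating all P(len,n) ordered selections (one recursive call per remaining element at every level) and deduplicating their sorted tuples level by level, B enumerates the C(len,n) combinations once by a choose/skip recursion over strictly increasing positions, sorts each, and collects them into a set.
-- intended difference: For n == 0 with nonempty l, A returns the empty set (its recursion bottoms out in empty partial results) while B returns {()}, the single 0-element combination, which is the standard value (what itertools.combinations(l, 0) yields). — e.g. on choose_list_internal([1], 0): A returns [], B returns [[]]
-- outside the precondition, e.g. on choose_list_internal([1, 2], 5): A returns None, B returns None
import Mathlib
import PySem

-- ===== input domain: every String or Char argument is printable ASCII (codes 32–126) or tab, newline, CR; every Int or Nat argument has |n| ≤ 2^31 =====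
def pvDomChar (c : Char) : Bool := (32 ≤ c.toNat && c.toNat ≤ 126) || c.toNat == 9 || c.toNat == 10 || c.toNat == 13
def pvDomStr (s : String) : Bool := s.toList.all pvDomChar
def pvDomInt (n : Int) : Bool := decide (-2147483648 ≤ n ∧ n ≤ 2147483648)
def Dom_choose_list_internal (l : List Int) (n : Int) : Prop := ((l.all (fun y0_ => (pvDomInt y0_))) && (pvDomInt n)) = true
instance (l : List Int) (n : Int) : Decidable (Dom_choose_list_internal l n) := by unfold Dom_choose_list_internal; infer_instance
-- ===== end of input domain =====

-- B replaces A's permutation enumeration (P(len,n) ordered selections, deduplicated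
-- level by level) by a direct choose/skip enumeration of the C(len,n) combinations.
-- Python A's return type is a list for n == 1 / n == len(l) and a set otherwise; a set is
-- ported as its PySem.Set list of distinct elements (Python's hash iteration order is not modelled).

-- ===== PORT A =====
-- l[0:i] + l[i+1:] = l.take i ++ l.drop (i+1), exact for 0 ≤ i < len(l) (i from range(len(l)));
-- l[i] = PySem.List.pyGetD l i 0, exact there as well.
def choose_list_internal (l : List Int) (n : Int) : List (List Int) :=
  if n = 1 then l.map (fun x => [x])
  else if n = (l.length : Int) then [l]
  else if n < (l.length : Int) then
    let ru := (List.range l.length).attach.foldl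
      (fun acc i =>
        acc ++ (choose_list_internal (l.take i.1 ++ l.drop (i.1 + 1)) (n - 1)).map
          (fun combo => PySem.List.pyGetD l (i.1 : Int) 0 :: combo)) []
    PySem.Set.ofList (ru.map (fun alon => PySem.List.sorted alon (fun x => x) false))
  else []  -- Python A falls through and returns None here (n > len(l), n ≠ 1): outside Pre_
termination_by l.length
decreasing_by
  have hi := i.2
  simp only [List.mem_range] at hi
  simp only [List.length_append, List.length_take, List.length_drop]
  omega

-- ===== PORT B =====
-- choose/skip recursion: combinations of k elements of rest, positions strictly increasing
def chooseCombs (l : List Int) (k : Int) : List (List Int) :=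
  if k = 0 then [[]]
  else match l with
    | [] => []
    | x :: xs => ((chooseCombs xs (k - 1)).map (fun c => x :: c)) ++ chooseCombs xs k

def choose_list_internal_alt (l : List Int) (n : Int) : List (List Int) :=
  if n = 1 then l.map (fun x => [x])
  else if n = (l.length : Int) then [l]
  else if n < (l.length : Int) then
    PySem.Set.ofList ((chooseCombs l n).map (fun c => PySem.List.sorted c (fun x => x) false))
  else []  -- Python B falls through and returns None here too: outside Pre_

-- ===== PRECONDITION & SPEC =====
-- Pre_ excludes exactly the inputs (n > len(l) with n ≠ 1) on which Python A falls off the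
-- function and returns None, which is not a value of the declared set/list type.
def Pre_choose_list_internal (l : List Int) (n : Int) : Prop := n = 1 ∨ n ≤ (l.length : Int)
instance (l : List Int) (n : Int) : Decidable (Pre_choose_list_internal l n) := by
  unfold Pre_choose_list_internal; infer_instance

def pvWitness_choose_list_internal : List Int × Int := ([1, 2, 3], 2)

-- For n == 0 with nonempty l, A returns the empty set (its recursion bottoms out in empty
-- partial results) while B returns {()}, the single 0-element combination, which is the
-- standard value (what itertools.combinations(l, 0) yields).
def D_choose_list_internal (l : List Int) (n : Int) : Prop := n = 0 ∧ l ≠ []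
instance (l : List Int) (n : Int) : Decidable (D_choose_list_internal l n) := by
  unfold D_choose_list_internal; infer_instance

def Spec_choose_list_internal (l : List Int) (n : Int) (out : List (List Int)) : Prop :=
  ¬ D_choose_list_internal l n → out = choose_list_internal_alt l n
instance (l : List Int) (n : Int) (out : List (List Int)) : Decidable (Spec_choose_list_internal l n out) := by
  unfold Spec_choose_list_internal; infer_instance

def pvDiffWitness_choose_list_internal : List Int × Int := ([1], 0)
def pvDiffWitnessOut_choose_list_internal : (List (List Int)) × (List (List Int)) := ([], [[]])

-- ===== CLAIM (what is proved, stated in full; the proofs are below) =====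
def Claim_unchanged_choose_list_internal : Prop := ∀ (l : List Int) (n : Int), Dom_choose_list_internal l n → Pre_choose_list_internal l n → Spec_choose_list_internal l n (choose_list_internal l n)
def Claim_changed_choose_list_internal : Prop := Dom_choose_list_internal (pvDiffWitness_choose_list_internal.1) (pvDiffWitness_choose_list_internal.2) ∧ Pre_choose_list_internal (pvDiffWitness_choose_list_internal.1) (pvDiffWitness_choose_list_internal.2) ∧ D_choose_list_internal (pvDiffWitness_choose_list_internal.1) (pvDiffWitness_choose_list_internal.2) ∧ choose_list_internal (pvDiffWitness_choose_list_internal.1) (pvDiffWitness_choose_list_internal.2) = pvDiffWitnessOut_choose_list_internal.1 ∧ choose_list_internal_alt (pvDiffWitness_choose_list_internal.1) (pvDiffWitness_choose_list_internal.2) = pvDiffWitnessOut_choose_list_internal.2 ∧ pvDiffWitnessOut_choose_list_internal.1 ≠ pvDiffWitnessOut_choose_list_internal.2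
def Claim_exact_choose_list_internal : Prop := ∀ (l : List Int) (n : Int), Dom_choose_list_internal l n → Pre_choose_list_internal l n → D_choose_list_internal l n → choose_list_internal l n ≠ choose_list_internal_alt l n

-- ===== LEMMAS AND PROOFS =====

-- abbreviation used only in proofs
def srt (t : List Int) : List Int := PySem.List.sorted t (fun x => x) false

-- Nat-indexed mirror of chooseCombs, used only in proofs
def combsN : List Int → Nat → List (List Int)
  | _, 0 => [[]]
  | [], _ + 1 => []
  | x :: xs, m + 1 => ((combsN xs m).map (fun c => x :: c)) ++ combsN xs (m + 1)

lemma chooseCombs_natCast (l : List Int) (m : Nat) : chooseCombs l (m : Int) = combsN l m := by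
  induction l generalizing m with
  | nil =>
    cases m with
    | zero => simp [chooseCombs, combsN]
    | succ m => rw [chooseCombs]; simp [combsN, show ((m:Int)+1) ≠ 0 by omega]
  | cons x xs ih =>
    cases m with
    | zero => simp [chooseCombs, combsN]
    | succ m =>
      rw [chooseCombs]
      have h1 : ((m + 1 : Nat) : Int) ≠ 0 := by push_cast; omega
      have h2 : ((m + 1 : Nat) : Int) - 1 = (m : Int) := by push_cast; ring
      rw [if_neg h1]
      show ((chooseCombs xs (((m + 1 : Nat) : Int) - 1)).map (fun c => x :: c))
          ++ chooseCombs xs ((m + 1 : Nat) : Int) = _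
      rw [h2, ih m, ih (m + 1), combsN]

lemma chooseCombs_neg (l : List Int) (k : Int) (hk : k < 0) : chooseCombs l k = [] := by
  induction l generalizing k with
  | nil => rw [chooseCombs]; simp [show k ≠ 0 by omega]
  | cons x xs ih =>
    rw [chooseCombs]
    simp [show k ≠ 0 by omega, ih (k - 1) (by omega), ih k hk]

-- index-lex expansion of A's loop: for each position i, l[i] prepended to the
-- (m-1)-combinations of l with position i deleted
def Qp (l : List Int) (m : Nat) : List (List Int) :=
  (List.range l.length).flatMap (fun i => (combsN (l.eraseIdx i) (m - 1)).map (fun c => l.getD i 0 :: c))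

lemma srt_perm_congr {t u : List Int} (h : t.Perm u) : srt t = srt u :=
  PySem.List.sorted_eq_sorted_of_perm t u (fun x => x) (fun _ _ hxy => hxy) h

lemma srt_idem (t : List Int) : srt (srt t) = srt t :=
  PySem.List.sorted_sorted t (fun x => x)

lemma srt_cons_srt (x : Int) (t : List Int) : srt (x :: srt t) = srt (x :: t) :=
  srt_perm_congr (List.Perm.cons x (PySem.List.sorted_perm t (fun x => x) false))

lemma ofList_map_ofList {α β : Type} [BEq α] [LawfulBEq α] [BEq β] [LawfulBEq β] (f : α → β) (u : List α) :
    PySem.Set.ofList ((PySem.Set.ofList u).map f) = PySem.Set.ofList (u.map f) := by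
  induction u using List.reverseRecOn with
  | nil => rfl
  | append_singleton u x ih =>
    rw [PySem.Set.ofList_append_singleton, List.map_append, List.map_singleton,
      PySem.Set.ofList_append_singleton]
    by_cases hx : x ∈ u
    · rw [PySem.Set.add_of_mem ((PySem.Set.mem_ofList u x).mpr hx), ih,
        PySem.Set.add_of_mem ((PySem.Set.mem_ofList (u.map f) (f x)).mpr
          (List.mem_map.mpr ⟨x, hx, rfl⟩))]
    · rw [PySem.Set.add_of_not_mem (fun hc => hx ((PySem.Set.mem_ofList u x).mp hc)),
        List.map_append, List.map_singleton, PySem.Set.ofList_append_singleton, ih]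

lemma update_congr {α : Type} [BEq α] [LawfulBEq α] {u v : List α}
    (h : PySem.Set.ofList u = PySem.Set.ofList v) (s : List α) :
    PySem.Set.update s u = PySem.Set.update s v := by
  rw [PySem.Set.update_eq_append_filter, PySem.Set.update_eq_append_filter, h]

lemma ofList_map_congr {α β : Type} [BEq α] [LawfulBEq α] [BEq β] [LawfulBEq β] (f : α → β) {u v : List α}
    (h : PySem.Set.ofList u = PySem.Set.ofList v) :
    PySem.Set.ofList (u.map f) = PySem.Set.ofList (v.map f) := by
  rw [← ofList_map_ofList f u, h, ofList_map_ofList]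

lemma update_of_subset {α : Type} [BEq α] [LawfulBEq α] {u s : List α} (h : ∀ x ∈ u, x ∈ s) :
    PySem.Set.update s u = s := by
  rw [PySem.Set.update_eq_append_filter]
  have : List.filter (fun y => !PySem.Set.contains s y) (PySem.Set.ofList u) = [] := by
    rw [List.filter_eq_nil_iff]
    intro y hy
    have : y ∈ s := h y ((PySem.Set.mem_ofList u y).mp hy)
    simp [PySem.Set.contains_iff, this]
  rw [this, List.append_nil]

lemma mem_combsN {c l : List Int} {m : Nat} : c ∈ combsN l m ↔ c.Sublist l ∧ c.length = m := by
  induction l generalizing c m with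
  | nil =>
    cases m with
    | zero => simp [combsN, List.sublist_nil, List.length_eq_zero_iff]
    | succ m =>
      simp only [combsN, List.not_mem_nil, false_iff, not_and]
      intro hs
      simp [List.sublist_nil.mp hs]
  | cons x xs ih =>
    cases m with
    | zero =>
      simp only [combsN, List.mem_singleton]
      constructor
      · rintro rfl; exact ⟨List.nil_sublist _, rfl⟩
      · rintro ⟨_, hl⟩; exact List.length_eq_zero_iff.mp hl
    | succ m =>
      simp only [combsN, List.mem_append, List.mem_map, ih, List.sublist_cons_iff]
      constructor
      · rintro (⟨c', ⟨hs, hl⟩, rfl⟩ | ⟨hs, hl⟩)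
        · exact ⟨Or.inr ⟨c', rfl, hs⟩, by simp [hl]⟩
        · exact ⟨Or.inl hs, hl⟩
      · rintro ⟨hs | ⟨r, rfl, hr⟩, hl⟩
        · exact Or.inr ⟨hs, hl⟩
        · exact Or.inl ⟨r, ⟨hr, by simpa using hl⟩, rfl⟩

lemma combsN_of_gt {l : List Int} {m : Nat} (h : l.length < m) : combsN l m = [] := by
  rw [List.eq_nil_iff_forall_not_mem]
  intro c hc
  obtain ⟨hs, hl⟩ := mem_combsN.mp hc
  have := hs.length_le
  omega

lemma combsN_self (l : List Int) : combsN l l.length = [l] := by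
  induction l with
  | nil => rfl
  | cons x xs ih =>
    show combsN (x :: xs) (xs.length + 1) = [x :: xs]
    rw [combsN, ih, combsN_of_gt (by omega)]
    rfl

lemma combsN_one (l : List Int) : combsN l 1 = l.map (fun x => [x]) := by
  induction l with
  | nil => rfl
  | cons x xs ih => rw [combsN, ih]; simp [combsN]

lemma perm_getElem_cons_eraseIdx (xs : List Int) (j : Nat) (h : j < xs.length) :
    (xs[j] :: xs.eraseIdx j).Perm xs := by
  rw [List.eraseIdx_eq_take_drop_succ]
  have h2 : xs = xs.take j ++ xs[j] :: xs.drop (j + 1) := by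
    conv_lhs => rw [← List.take_append_drop j xs]
    rw [List.getElem_cons_drop]
  conv_rhs => rw [h2]
  exact (List.perm_middle).symm

-- every value multiset that embeds into xs is realized by some increasing-position combination
lemma realize_subperm {t xs : List Int} {m : Nat} (h : t.Subperm xs) (hl : t.length = m) :
    ∃ d ∈ combsN xs m, d.Perm t := by
  obtain ⟨d, hperm, hsub⟩ := h
  exact ⟨d, mem_combsN.mpr ⟨hsub, by rw [hperm.length_eq, hl]⟩, hperm⟩

lemma update_flatMap_absorb {α J : Type} [BEq α] [LawfulBEq α] (js : List J) (X Y : J → List α)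
    (s : List α) (hX : ∀ j ∈ js, ∀ e ∈ X j, e ∈ s) :
    PySem.Set.update s (js.flatMap (fun j => X j ++ Y j)) = PySem.Set.update s (js.flatMap Y) := by
  induction js generalizing s with
  | nil => rfl
  | cons j js ih =>
    rw [List.flatMap_cons, List.flatMap_cons, PySem.Set.update_append, PySem.Set.update_append,
      PySem.Set.update_append, update_of_subset (hX j (List.mem_cons_self) )]
    exact ih (PySem.Set.update s (Y j))
      (fun j' hj' e he => (PySem.Set.mem_update _ _ _).mpr
        (Or.inl (hX j' (List.mem_cons_of_mem _ hj') e he)))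

lemma update_flatMap_congr {α J : Type} [BEq α] [LawfulBEq α] (js : List J) (f g : J → List α)
    (s : List α) (h : ∀ j ∈ js, PySem.Set.ofList (f j) = PySem.Set.ofList (g j)) :
    PySem.Set.update s (js.flatMap f) = PySem.Set.update s (js.flatMap g) := by
  induction js generalizing s with
  | nil => rfl
  | cons j js ih =>
    rw [List.flatMap_cons, List.flatMap_cons, PySem.Set.update_append, PySem.Set.update_append,
      update_congr (h j (List.mem_cons_self)) s]
    exact ih _ (fun j' hj' => h j' (List.mem_cons_of_mem _ hj'))

lemma flatMap_range_getD (l : List Int) :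
    (List.range l.length).flatMap (fun i => [[l.getD i 0]]) = l.map (fun x => [x]) := by
  induction l with
  | nil => rfl
  | cons x xs ih =>
    rw [List.length_cons, List.range_succ_eq_map, List.flatMap_cons, List.flatMap_map]
    simp only [List.getD_cons_zero, Nat.succ_eq_add_one, List.getD_cons_succ]
    rw [List.singleton_append, List.map_cons]
    exact congrArg _ ih

lemma Qp_one (l : List Int) : Qp l 1 = l.map (fun x => [x]) := by
  unfold Qp
  have h : ∀ i ∈ List.range l.length,
      (combsN (l.eraseIdx i) (1 - 1)).map (fun c => l.getD i 0 :: c) = [[l.getD i 0]] := by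
    intro i _
    have h0 : combsN (l.eraseIdx i) (1 - 1) = [[]] := by rw [combsN]
    rw [h0, List.map_singleton]
  rw [List.flatMap_congr h]
  exact flatMap_range_getD l

-- the heart: deduplicated sorted permutation-expansion = deduplicated sorted combinations
lemma crux (m : Nat) (hm : 1 ≤ m) (l : List Int) :
    PySem.Set.ofList ((Qp l m).map srt) = PySem.Set.ofList ((combsN l m).map srt) := by
  rcases Nat.lt_or_ge m 2 with h2 | h2
  · have hm1 : m = 1 := by omega
    subst hm1
    rw [Qp_one, combsN_one]
  · obtain ⟨k, rfl⟩ : ∃ k, m = k + 2 := ⟨m - 2, by omega⟩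
    induction l with
    | nil =>
      have hq : Qp [] (k + 2) = [] := rfl
      have hc : combsN ([] : List Int) (k + 2) = [] := by rw [combsN]
      rw [hq, hc]
    | cons x xs ih =>
      -- unfold both sides to "head block ++ rest"
      have hcmb : combsN (x :: xs) (k + 2)
          = ((combsN xs (k + 1)).map (fun c => x :: c)) ++ combsN xs (k + 2) := by rw [combsN]
      have hqp : Qp (x :: xs) (k + 2)
          = ((combsN xs (k + 1)).map (fun c => x :: c))
            ++ (List.range xs.length).flatMap
                (fun j => (combsN ((x :: xs).eraseIdx (j + 1)) (k + 1)).map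
                  (fun c => (x :: xs).getD (j + 1) 0 :: c)) := by
        unfold Qp
        rw [List.length_cons, List.range_succ_eq_map, List.flatMap_cons, List.flatMap_map]
        rfl
      rw [hcmb, hqp, List.map_append, List.map_append, PySem.Set.ofList_append,
        PySem.Set.ofList_append, List.map_flatMap]
      -- canonicalize the per-index blocks
      have hbl : ∀ j ∈ List.range xs.length,
          ((combsN ((x :: xs).eraseIdx (j + 1)) (k + 1)).map
            (fun c => (x :: xs).getD (j + 1) 0 :: c)).map srt
          = ((combsN (xs.eraseIdx j) k).map (fun c => srt (xs.getD j 0 :: x :: c)))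
            ++ ((combsN (xs.eraseIdx j) (k + 1)).map (fun c => srt (xs.getD j 0 :: c))) := by
        intro j _
        rw [List.eraseIdx_cons_succ, List.getD_cons_succ, combsN, List.map_append,
          List.map_append, List.map_map, List.map_map, List.map_map]
        rfl
      rw [List.flatMap_congr hbl]
      refine Eq.trans (update_flatMap_absorb (List.range xs.length)
        (fun j => (combsN (xs.eraseIdx j) k).map (fun c => srt (xs.getD j 0 :: x :: c)))
        (fun j => (combsN (xs.eraseIdx j) (k + 1)).map (fun c => srt (xs.getD j 0 :: c)))
        _ ?_) ?_
      · -- the x-containing blocks are already present in the head block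
        intro j hj e he
        rw [List.mem_range] at hj
        rw [List.mem_map] at he
        obtain ⟨c, hc, rfl⟩ := he
        obtain ⟨hsub, hlen⟩ := mem_combsN.mp hc
        have hgd : xs.getD j 0 = xs[j] := List.getD_eq_getElem xs 0 hj
        have hsp : (xs[j] :: c).Subperm xs :=
          List.Subperm.trans (List.Sublist.subperm (List.Sublist.cons₂ xs[j] hsub))
            (List.Perm.subperm (perm_getElem_cons_eraseIdx xs j hj))
        obtain ⟨d, hd, hdp⟩ := realize_subperm hsp (by rw [List.length_cons, hlen])
        rw [PySem.Set.mem_ofList]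
        rw [List.mem_map]
        refine ⟨x :: d, List.mem_map.mpr ⟨d, hd, rfl⟩, ?_⟩
        calc srt (x :: d) = srt (x :: xs[j] :: c) := srt_perm_congr (List.Perm.cons x hdp)
          _ = srt (xs[j] :: x :: c) := srt_perm_congr (List.Perm.swap xs[j] x c)
          _ = srt (xs.getD j 0 :: x :: c) := by rw [hgd]
      · -- remaining rest equals srt-image of Qp xs (k+2); conclude by the inner IH
        have hq2 : (List.range xs.length).flatMap
            (fun j => (combsN (xs.eraseIdx j) (k + 1)).map (fun c => srt (xs.getD j 0 :: c)))
            = (Qp xs (k + 2)).map srt := by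
          unfold Qp
          rw [List.map_flatMap]
          apply List.flatMap_congr
          intro j _
          rw [List.map_map]
          rfl
        rw [hq2]
        exact update_congr ih _

-- A's loop, rewritten from the attached fold to a flatMap over the index range
lemma ru_eq (l : List Int) (n : Int) :
    (List.range l.length).attach.foldl
      (fun acc i =>
        acc ++ (choose_list_internal (l.take i.1 ++ l.drop (i.1 + 1)) (n - 1)).map
          (fun combo => PySem.List.pyGetD l (i.1 : Int) 0 :: combo)) []
    = (List.range l.length).flatMap
        (fun i => (choose_list_internal (l.eraseIdx i) (n - 1)).map
          (fun combo => l.getD i 0 :: combo)) := by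
  rw [List.foldl_attach (l := List.range l.length)
      (f := fun acc i => acc ++ (choose_list_internal (l.take i ++ l.drop (i + 1)) (n - 1)).map
        (fun combo => PySem.List.pyGetD l (i : Int) 0 :: combo)),
    PySem.List.foldl_append_eq_flatMap, List.nil_append]
  apply List.flatMap_congr
  intro i _
  rw [PySem.List.pyGetD_natCast, ← List.eraseIdx_eq_take_drop_succ]

lemma choose_eq_branch3 (l : List Int) (n : Int) (h1 : n ≠ 1) (h2 : n ≠ (l.length : Int))
    (h3 : n < (l.length : Int)) :
    choose_list_internal l n
      = PySem.Set.ofList (((List.range l.length).flatMap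
          (fun i => (choose_list_internal (l.eraseIdx i) (n - 1)).map
            (fun combo => l.getD i 0 :: combo))).map srt) := by
  rw [choose_list_internal, if_neg h1, if_neg h2, if_pos h3]
  show PySem.Set.ofList (((List.range l.length).attach.foldl _ []).map
    (fun alon => PySem.List.sorted alon (fun x => x) false)) = _
  rw [ru_eq]
  rfl

lemma choose_nil_neg (n : Int) (hn : n < 0) : choose_list_internal [] n = [] := by
  rw [choose_eq_branch3 [] n (by omega) (by simp only [List.length_nil, Nat.cast_zero]; omega)
    (by simp only [List.length_nil, Nat.cast_zero]; omega)]
  rfl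

lemma choose_nonpos (l : List Int) (n : Int) (hn : n ≤ 0) (h : ¬(n = 0 ∧ l = [])) :
    choose_list_internal l n = [] := by
  suffices H : ∀ (N : Nat) (l : List Int) (n : Int), l.length ≤ N → n ≤ 0 → ¬(n = 0 ∧ l = []) →
      choose_list_internal l n = [] from H l.length l n le_rfl hn h
  intro N
  induction N with
  | zero =>
    intro l n hlen hn h
    have hl : l = [] := List.length_eq_zero_iff.mp (by omega)
    subst hl
    have hn0 : n ≠ 0 := fun hc => h ⟨hc, rfl⟩
    exact choose_nil_neg n (by omega)
  | succ N ih =>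
    intro l n hlen hn h
    rcases l with _ | ⟨x, xs⟩
    · have hn0 : n ≠ 0 := fun hc => h ⟨hc, rfl⟩
      exact choose_nil_neg n (by omega)
    · have hlen1 : 0 < (x :: xs).length := by simp
      rw [choose_eq_branch3 (x :: xs) n (by omega) (by omega) (by omega)]
      have hz : (List.range (x :: xs).length).flatMap
          (fun i => (choose_list_internal ((x :: xs).eraseIdx i) (n - 1)).map
            (fun combo => (x :: xs).getD i 0 :: combo)) = [] := by
        rw [List.flatMap_eq_nil_iff]
        intro i hi
        rw [List.mem_range] at hi
        have hlen2 : ((x :: xs).eraseIdx i).length ≤ N := by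
          rw [List.length_eraseIdx]
          simp only [hi, if_true]
          omega
        rw [ih _ (n - 1) hlen2 (by omega) (by rintro ⟨h0, _⟩; omega), List.map_nil]
      rw [hz]
      rfl

lemma main_lemma (l : List Int) (m : Nat) (h1 : 1 ≤ m) (h2 : m ≤ l.length) :
    PySem.Set.ofList ((choose_list_internal l (m : Int)).map srt)
      = PySem.Set.ofList ((combsN l m).map srt) := by
  suffices H : ∀ (N : Nat) (l : List Int) (m : Nat), l.length ≤ N → 1 ≤ m → m ≤ l.length →
      PySem.Set.ofList ((choose_list_internal l (m : Int)).map srt)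
        = PySem.Set.ofList ((combsN l m).map srt) from H l.length l m le_rfl h1 h2
  intro N
  induction N with
  | zero => intro l m hlen hm1 hm2; omega
  | succ N ih =>
    intro l m hlen hm1 hm2
    by_cases hm : m = 1
    · subst hm
      rw [choose_list_internal, if_pos (by norm_num), combsN_one]
    · by_cases hml : m = l.length
      · subst hml
        rw [choose_list_internal, if_neg (by exact_mod_cast hm), if_pos rfl, combsN_self]
      · have hm2' : m < l.length := by omega
        have hne1 : (m : Int) ≠ 1 := by exact_mod_cast hm
        have hnel : (m : Int) ≠ (l.length : Int) := by exact_mod_cast hml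
        have hlt : (m : Int) < (l.length : Int) := by exact_mod_cast hm2'
        rw [choose_eq_branch3 l (m : Int) hne1 hnel hlt]
        have hcast : (m : Int) - 1 = ((m - 1 : Nat) : Int) := by omega
        rw [hcast, ofList_map_ofList, List.map_map]
        have hss : srt ∘ srt = srt := funext srt_idem
        rw [hss, List.map_flatMap]
        have hpoint : ∀ i ∈ List.range l.length,
            ((choose_list_internal (l.eraseIdx i) ((m - 1 : Nat) : Int)).map
              (fun combo => l.getD i 0 :: combo)).map srt
            = ((choose_list_internal (l.eraseIdx i) ((m - 1 : Nat) : Int)).map srt).map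
                (fun t => srt (l.getD i 0 :: t)) := by
          intro i _
          rw [List.map_map, List.map_map]
          exact List.map_congr_left (fun c _ => (srt_cons_srt (l.getD i 0) c).symm)
        rw [List.flatMap_congr hpoint, ← PySem.Set.update_nil_left]
        refine Eq.trans (update_flatMap_congr (List.range l.length)
          (fun i => ((choose_list_internal (l.eraseIdx i) ((m - 1 : Nat) : Int)).map srt).map
            (fun t => srt (l.getD i 0 :: t)))
          (fun i => ((combsN (l.eraseIdx i) (m - 1)).map srt).map
            (fun t => srt (l.getD i 0 :: t)))
          [] ?_) ?_
        · intro i hi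
          rw [List.mem_range] at hi
          have hlen2 : (l.eraseIdx i).length ≤ N := by
            rw [List.length_eraseIdx]; simp only [hi, if_true]; omega
          exact ofList_map_congr _ (ih (l.eraseIdx i) (m - 1) hlen2 (by omega)
            (by rw [List.length_eraseIdx]; simp only [hi, if_true]; omega))
        · rw [PySem.Set.update_nil_left]
          have hG : (List.range l.length).flatMap
              (fun i => ((combsN (l.eraseIdx i) (m - 1)).map srt).map
                (fun t => srt (l.getD i 0 :: t)))
              = (Qp l m).map srt := by
            unfold Qp
            rw [List.map_flatMap]
            apply List.flatMap_congr
            intro i _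
            rw [List.map_map, List.map_map]
            exact List.map_congr_left (fun c _ => srt_cons_srt (l.getD i 0) c)
          rw [hG]
          exact crux m hm1 l

-- ===== VERDICT (by name: the statement is the Claim_ definition above) =====
theorem choose_list_internal_spec : Claim_unchanged_choose_list_internal := by
  unfold Claim_unchanged_choose_list_internal Spec_choose_list_internal D_choose_list_internal
  intro l n _hd hpre hnd
  by_cases hn1 : n = 1
  · subst hn1
    rw [choose_list_internal, if_pos rfl, choose_list_internal_alt, if_pos rfl]
  · rcases (by omega : n ≤ 0 ∨ 0 < n) with hn0 | hnpos
    · by_cases h00 : n = 0 ∧ l = []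
      · obtain ⟨rfl, rfl⟩ := h00
        rw [choose_list_internal, if_neg (by norm_num), if_pos (by norm_num),
          choose_list_internal_alt, if_neg (by norm_num), if_pos (by norm_num)]
      · have hne0 : n ≠ 0 := by
          intro h0
          subst h0
          by_cases hle : l = []
          · exact h00 ⟨rfl, hle⟩
          · exact hnd ⟨rfl, hle⟩
        have hneg : n < 0 := by omega
        have hlen0 : (0 : Int) ≤ (l.length : Int) := Int.natCast_nonneg _
        rw [choose_nonpos l n hn0 (by rintro ⟨h0, _⟩; omega),
          choose_list_internal_alt, if_neg hn1, if_neg (by omega), if_pos (by omega),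
          chooseCombs_neg l n hneg, List.map_nil]
        rfl
    · have hpre2 : n ≤ (l.length : Int) := by
        rcases hpre with h | h
        · exact absurd h hn1
        · exact h
      obtain ⟨m, rfl⟩ : ∃ m : Nat, n = (m : Int) :=
        ⟨n.toNat, (Int.toNat_of_nonneg (by omega)).symm⟩
      have hm2 : m ≤ l.length := by omega
      by_cases hml : m = l.length
      · subst hml
        rw [choose_list_internal, if_neg hn1, if_pos rfl,
          choose_list_internal_alt, if_neg hn1, if_pos rfl]
      · have hmlt : m < l.length := by omega
        have hne1 : (m : Int) ≠ 1 := hn1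
        have hnel : (m : Int) ≠ (l.length : Int) := by exact_mod_cast hml
        have hlt : (m : Int) < (l.length : Int) := by exact_mod_cast hmlt
        rw [choose_list_internal_alt, if_neg hne1, if_neg hnel, if_pos hlt,
          chooseCombs_natCast]
        have hfix : PySem.Set.ofList ((choose_list_internal l (m : Int)).map srt)
            = choose_list_internal l (m : Int) := by
          rw [choose_eq_branch3 l (m : Int) hne1 hnel hlt, ofList_map_ofList, List.map_map,
            (funext srt_idem : srt ∘ srt = srt)]
        rw [← hfix, main_lemma l m (by omega) hm2]
        rfl

theorem choose_list_internal_changed : Claim_changed_choose_list_internal := by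
  unfold Claim_changed_choose_list_internal
  refine ⟨by decide, by decide, by decide, ?_, ?_, by decide⟩
  · show choose_list_internal [1] 0 = []
    exact choose_nonpos [1] 0 le_rfl (by simp)
  · show choose_list_internal_alt [1] 0 = [[]]
    decide

theorem choose_list_internal_tight : Claim_exact_choose_list_internal := by
  unfold Claim_exact_choose_list_internal D_choose_list_internal
  intro l n _hd _hpre hd
  obtain ⟨hn0, hl⟩ := hd
  subst hn0
  have hlen : 0 < l.length := List.length_pos_iff.mpr hl
  rw [choose_nonpos l 0 le_rfl (by rintro ⟨_, h⟩; exact hl h),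
    choose_list_internal_alt, if_neg (by norm_num), if_neg (by omega), if_pos (by omega)]
  have h0 : chooseCombs l 0 = [[]] := by rw [chooseCombs.eq_def, if_pos rfl]
  rw [h0]
  decide
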